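-- pv_equiv track=rewrite | github.com/Bhargav-Manam/Federated-Learning-Data-Privacy | TP3/data/utils.py | iid_divide
-- ===== SOURCE A (Python) =====
-- def iid_divide(l_, g):
--     """
--     https://github.com/TalwalkarLab/leaf/blob/master/data/utils/sample.py
--
--     divide list `l` among `g` groups
--     each group has either `int(len(l)/g)` or `int(len(l)/g)+1` elements
--     returns a list of groups
--
--     """
--     num_elems = len(l_)
--     group_size = int(len(l_) / g)
--     num_big_groups = num_elems - g * group_size
--     num_small_groups = g - num_big_groups
--     glist = []
--     for i in range(num_small_groups):
--         glist.append(l_[group_size * i: group_size * (i + 1)])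
--     bi = group_size * num_small_groups
--     group_size += 1
--     for i in range(num_big_groups):
--         glist.append(l_[bi + group_size * i:bi + group_size * (i + 1)])
--     return glist
-- ===== SOURCE B (Python) =====
-- def iid_divide(l_, g):
--     groups = []
--     start = 0
--     while g > 0:
--         k = (len(l_) - start) // g
--         groups.append(l_[start:start + k])
--         start += k
--         g -= 1
--     return groups
-- ===== Notes on version B (the rewrite author's own statement) =====
-- stated objective: alternative
-- what changed: A precomputes group_size, num_big_groups and num_small_groups and emits slices from two separate index-arithmetic loops; B never computes those counts: a single loop peels one group per iteration, recomputing its size k = (len(l_) - start)//g from the remaining length and remaining group count, which yields the same small-groups-first balanced split.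
-- outside the precondition, e.g. on iid_divide([1, 2, 3, 4, 5], -2): A returns [[]], B returns []
import Mathlib
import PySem

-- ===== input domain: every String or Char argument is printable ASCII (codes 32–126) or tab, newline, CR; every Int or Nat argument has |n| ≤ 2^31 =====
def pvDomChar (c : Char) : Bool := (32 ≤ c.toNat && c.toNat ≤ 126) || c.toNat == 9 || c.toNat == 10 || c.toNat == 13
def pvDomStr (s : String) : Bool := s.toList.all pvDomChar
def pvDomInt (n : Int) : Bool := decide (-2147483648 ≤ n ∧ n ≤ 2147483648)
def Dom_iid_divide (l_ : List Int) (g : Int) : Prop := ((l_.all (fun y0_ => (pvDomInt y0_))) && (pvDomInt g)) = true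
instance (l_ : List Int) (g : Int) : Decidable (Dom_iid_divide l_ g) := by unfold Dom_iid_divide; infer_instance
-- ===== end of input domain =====

-- B replaces A's precomputed counts and two index-arithmetic slicing loops by a single
-- loop that peels one group per step, recomputing len(rest)//g on the shrinking
-- remainder (objective: alternative algorithm, same asymptotic cost).


-- ===== PORT A =====
-- int(len(l_)/g) truncates the true-division quotient toward zero: PySem.Int.truncdiv
-- (exact for the magnitudes admitted by Dom_).
def iid_divide (l_ : List Int) (g : Int) : List (List Int) :=
  let numElems : Int := l_.length
  let groupSize : Int := PySem.Int.truncdiv numElems g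
  let numBigGroups : Int := numElems - g * groupSize
  let numSmallGroups : Int := g - numBigGroups
  let glist : List (List Int) :=
    (PySem.List.pyRange 0 numSmallGroups 1).foldl
      (fun acc i => acc ++ [PySem.List.slice l_ (some (groupSize * i)) (some (groupSize * (i + 1)))]) []
  let bi : Int := groupSize * numSmallGroups
  let groupSize' : Int := groupSize + 1
  (PySem.List.pyRange 0 numBigGroups 1).foldl
    (fun acc i => acc ++ [PySem.List.slice l_ (some (bi + groupSize' * i)) (some (bi + groupSize' * (i + 1)))]) glist

-- ===== PORT B =====
-- Source B's `while g > 0` loop as structural recursion on the loop counter: the Nat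
-- argument is the current (positive) value of g, so the loop runs g.toNat times;
-- state (start, groups) as in Source B, k = (len(l_) - start)//g recomputed each iteration.
def iidGoB (l_ : List Int) : Nat → Int → List (List Int) → List (List Int)
  | 0, _, groups => groups
  | m+1, start, groups =>
      let k : Int := PySem.Int.floordiv ((l_.length : Int) - start) ((m+1 : Nat) : Int)
      iidGoB l_ m (start + k) (groups ++ [PySem.List.slice l_ (some start) (some (start + k))])

def iid_divide_alt (l_ : List Int) (g : Int) : List (List Int) := iidGoB l_ g.toNat 0 []

-- ===== PRECONDITION & SPEC =====
-- Pre_ excludes g ≤ 0: at g = 0 A raises ZeroDivisionError, and a negative group count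
-- is outside the task's natural domain — A's values there are accidents of its slice
-- arithmetic (e.g. one empty group for a 5-element list and g = -2), while B returns [].
def Pre_iid_divide (l_ : List Int) (g : Int) : Prop := 1 ≤ g
instance (l_ : List Int) (g : Int) : Decidable (Pre_iid_divide l_ g) := by unfold Pre_iid_divide; infer_instance
def pvWitness_iid_divide : List Int × Int := ([1, 2, 3, 4, 5], 2)

def Spec_iid_divide (l_ : List Int) (g : Int) (out : List (List Int)) : Prop := out = iid_divide_alt l_ g
instance (l_ : List Int) (g : Int) (out : List (List Int)) : Decidable (Spec_iid_divide l_ g out) := by unfold Spec_iid_divide; infer_instance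

-- ===== CLAIM (what is proved, stated in full; the proofs are below) =====
def Claim_equal_iid_divide : Prop := ∀ (l_ : List Int) (g : Int), Dom_iid_divide l_ g → Pre_iid_divide l_ g → Spec_iid_divide l_ g (iid_divide l_ g)

-- ===== LEMMAS AND PROOFS =====

-- Common reference shape: `a` groups of `s` elements followed by `b` groups of `s+1`,
-- taken from the front of `l`.
def chunkRec : List Int → Nat → Nat → Nat → List (List Int)
  | _, _, 0, 0 => []
  | l, s, a+1, b => l.take s :: chunkRec (l.drop s) s a b
  | l, s, 0, b+1 => l.take (s+1) :: chunkRec (l.drop (s+1)) s 0 b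

-- b groups of size s+1 are the same whether produced as "big" groups of parameter s
-- or as "small" groups of parameter s+1.
theorem chunkRec_shift (b : Nat) : ∀ (l : List Int) (s : Nat),
    chunkRec l s 0 b = chunkRec l (s+1) b 0 := by
  induction b with
  | zero => intro l s; simp [chunkRec]
  | succ b ih => intro l s; simp only [chunkRec, ih]

-- the all-big block as a map of slices.
theorem chunkRec_zero_eq_map (b : Nat) : ∀ (l : List Int) (s : Nat),
    chunkRec l s 0 b = (List.range b).map (fun i => (l.drop ((s+1)*i)).take (s+1)) := by
  induction b with
  | zero => intro l s; simp [chunkRec]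
  | succ b ih =>
    intro l s
    simp only [chunkRec, ih, List.range_succ_eq_map, List.map_cons, List.map_map,
      List.cons.injEq]
    refine ⟨by simp, ?_⟩
    apply List.map_congr_left
    intro i _
    simp only [Function.comp_apply, List.drop_drop, Nat.succ_eq_add_one]
    congr 2
    ring

-- chunkRec as the two maps A produces.
theorem chunkRec_eq_maps (a : Nat) : ∀ (b : Nat) (l : List Int) (s : Nat),
    chunkRec l s a b
      = (List.range a).map (fun i => (l.drop (s*i)).take s)
        ++ (List.range b).map (fun i => (l.drop (s*a + (s+1)*i)).take (s+1)) := by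
  induction a with
  | zero =>
    intro b l s
    rw [chunkRec_zero_eq_map]
    simp
  | succ a iha =>
    intro b l s
    simp only [chunkRec, iha, List.range_succ_eq_map, List.map_cons, List.map_map,
      List.cons_append, List.cons.injEq]
    refine ⟨by simp, ?_⟩
    congr 1
    · apply List.map_congr_left
      intro i _
      simp only [Function.comp_apply, List.drop_drop, Nat.succ_eq_add_one]
      congr 2
      ring
    · apply List.map_congr_left
      intro i _
      simp only [List.drop_drop]
      congr 2
      ring

-- B's loop computes chunkRec of the not-yet-consumed suffix, with the div/mod of the
-- remaining length by the remaining group count.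
theorem iidGoB_eq (l_ : List Int) (m : Nat) : ∀ (st : Nat) (acc : List (List Int)),
    st ≤ l_.length →
    iidGoB l_ (m+1) (st : Int) acc
      = acc ++ chunkRec (l_.drop st) ((l_.length - st)/(m+1))
          ((m+1) - (l_.length - st) % (m+1)) ((l_.length - st) % (m+1)) := by
  induction m with
  | zero =>
    intro st acc hst
    simp only [iidGoB, PySem.Int.floordiv_natCast,
      show ((l_.length : Int) - (st : Int)) = ((l_.length - st : Nat) : Int) from by omega]
    rw [show ((st : Int) + (((l_.length - st)/1 : Nat) : Int)
        = ((st + (l_.length - st)/1 : Nat) : Int)) from by push_cast; ring,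
      PySem.List.slice_natCast]
    simp [chunkRec, Nat.mod_one]
  | succ m ih =>
    intro st acc hst
    conv_lhs => rw [iidGoB]
    rw [show ((l_.length : Int) - (st : Int)) = ((l_.length - st : Nat) : Int) from by omega,
      PySem.Int.floordiv_natCast]
    set n' := l_.length - st with hn'
    set s := n' / (m+1+1) with hs
    set r := n' % (m+1+1) with hr
    have hdm : (m+1+1) * s + r = n' := Nat.div_add_mod n' (m+1+1)
    have hsplit : (m+1+1)*s = (m+1)*s + s := by ring
    have hrlt : r < m+1+1 := Nat.mod_lt n' (by omega)
    have hsle : s ≤ n' := Nat.div_le_self n' (m+1+1)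
    rw [show ((st : Int) + ((s : Nat) : Int)) = ((st + s : Nat) : Int) from by push_cast; ring,
      PySem.List.slice_natCast, Nat.add_sub_cancel_left,
      ih (st + s) _ (by omega)]
    have hlen : l_.length - (st + s) = (m+1)*s + r := by omega
    rw [hlen, show l_.drop (st + s) = (l_.drop st).drop s from by rw [List.drop_drop]]
    by_cases hcase : r < m+1
    · have hdiv : ((m+1)*s + r) / (m+1) = s := by
        rw [Nat.mul_add_div (by omega)]
        simp [Nat.div_eq_of_lt hcase]
      have hmod : ((m+1)*s + r) % (m+1) = r := by
        rw [Nat.mul_add_mod, Nat.mod_eq_of_lt hcase]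
      rw [hdiv, hmod, show (m+1+1) - r = ((m+1) - r) + 1 from by omega]
      simp [chunkRec]
    · have hre : r = m+1 := by omega
      have hdiv : ((m+1)*s + r) / (m+1) = s+1 := by
        rw [show (m+1)*s + r = (m+1)*(s+1) from by rw [hre]; ring,
          Nat.mul_div_cancel_left _ (by omega)]
      have hmod : ((m+1)*s + r) % (m+1) = 0 := by
        rw [show (m+1)*s + r = (m+1)*(s+1) from by rw [hre]; ring, Nat.mul_mod_right]
      rw [hdiv, hmod, ← chunkRec_shift, show (m+1+1) - r = 1 from by omega]
      simp [chunkRec, hre]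

-- ===== VERDICT (by name: the statement is the Claim_ definition above) =====
theorem iid_divide_spec : Claim_equal_iid_divide := by
  intro l_ g _hd hg
  have hg1 : (1 : Int) ≤ g := hg
  obtain ⟨m, hm⟩ : ∃ m : Nat, g = ((m+1 : Nat) : Int) := ⟨g.toNat - 1, by omega⟩
  subst hm
  unfold Spec_iid_divide iid_divide_alt
  rw [Int.toNat_natCast, show (0 : Int) = ((0 : Nat) : Int) from rfl,
    iidGoB_eq l_ m 0 [] (Nat.zero_le _), List.nil_append, List.drop_zero, Nat.sub_zero]
  simp only [iid_divide]
  set n := l_.length with hn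
  set s := n / (m+1) with hs
  set r := n % (m+1) with hr
  have hdm : (m+1) * s + r = n := Nat.div_add_mod n (m+1)
  have hrlt : r < m+1 := Nat.mod_lt n (by omega)
  have htrunc : PySem.Int.truncdiv (n : Int) ((m+1 : Nat) : Int) = ((s : Nat) : Int) := by
    simp [PySem.Int.truncdiv, hs]
  rw [htrunc]
  have hbig : (n : Int) - ((m+1 : Nat) : Int) * ((s : Nat) : Int) = ((r : Nat) : Int) := by
    rw [show ((m+1 : Nat) : Int) * ((s : Nat) : Int) = (((m+1)*s : Nat) : Int) from by
      push_cast; ring]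
    omega
  rw [hbig]
  have hsmall : ((m+1 : Nat) : Int) - ((r : Nat) : Int) = (((m+1) - r : Nat) : Int) := by
    omega
  rw [hsmall]
  rw [PySem.List.foldl_append_singleton_eq_map, PySem.List.foldl_append_singleton_eq_map,
    List.nil_append, PySem.List.pyRange_one, PySem.List.pyRange_one]
  simp only [Int.sub_zero, Int.toNat_natCast, List.map_map]
  rw [chunkRec_eq_maps]
  congr 1
  · apply List.map_congr_left
    intro k _
    simp only [Function.comp_apply]
    rw [show ((s : Nat) : Int) * ((0 : Int) + (k : Nat)) = ((s*k : Nat) : Int) from by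
        push_cast; ring,
      show ((s : Nat) : Int) * (((0 : Int) + (k : Nat)) + 1) = ((s*k + s : Nat) : Int) from by
        push_cast; ring,
      PySem.List.slice_natCast]
    rw [Nat.add_sub_cancel_left]
  · apply List.map_congr_left
    intro k _
    simp only [Function.comp_apply]
    rw [show ((s : Nat) : Int) * ((((m+1) - r : Nat)) : Int)
          + (((s : Nat) : Int) + 1) * ((0 : Int) + (k : Nat))
          = ((s*((m+1)-r) + (s+1)*k : Nat) : Int) from by
        push_cast [Nat.cast_sub (le_of_lt hrlt)]; ring,
      show ((s : Nat) : Int) * ((((m+1) - r : Nat)) : Int)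
          + (((s : Nat) : Int) + 1) * ((((0 : Int) + (k : Nat))) + 1)
          = ((s*((m+1)-r) + (s+1)*k + (s+1) : Nat) : Int) from by
        push_cast [Nat.cast_sub (le_of_lt hrlt)]; ring,
      PySem.List.slice_natCast]
    rw [Nat.add_sub_cancel_left]
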